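-- pv_equiv track=rewrite | github.com/IgrMd/yandex-algos-training | Тренировки по алгоритмам 1.0/Лекция 7. «Сортировка событий»/A.py | students_unattended
-- ===== SOURCE A (Python) =====
-- def students_unattended(n: int, m: int, intervals: list):
--     teachers = []
--     for b, e in intervals:
--         teachers.append((b, -1))
--         teachers.append((e + 1, 1))
--     teachers.sort()
--     curr_students_attended = 0
--     total_students_attended = 0
--     for i in range(len(teachers)):
--         if curr_students_attended > 0:
--             total_students_attended += teachers[i][0] - teachers[i - 1][0]
--         if teachers[i][1] == -1:
--             curr_students_attended += 1
--         if teachers[i][1] == 1: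
--             curr_students_attended -= 1
--     return n - total_students_attended
-- ===== SOURCE B (Python) =====
-- def students_unattended(n: int, m: int, intervals: list):
--     # Elementary-gap decomposition: the critical coordinates are the interval
--     # starts and the points just past the ends.  For each gap between two
--     # consecutive distinct critical coordinates, count directly (by a stabbing
--     # count over the intervals) the signed number of intervals covering it, and
--     # add the gap's length when that count is positive.
--     coords = sorted({b for b, _ in intervals} | {e + 1 for _, e in intervals})
--     covered = 0
--     for x, y in zip(coords, coords[1:]):
--         depth = sum((b <= x) - (e + 1 <= x) for b, e in intervals)
--         if depth > 0:
--             covered += y - x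
--     return n - covered
-- ===== Notes on version B (the rewrite author's own statement) =====
-- stated objective: alternative
-- what changed: A builds a sorted 2m-element tagged event list and sweeps it with a running open-intervals counter; B instead decomposes the line into elementary gaps between consecutive distinct critical coordinates and, for each gap, computes its covering depth directly by a stabbing count over the intervals - no event list and no running counter.
import Mathlib
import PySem

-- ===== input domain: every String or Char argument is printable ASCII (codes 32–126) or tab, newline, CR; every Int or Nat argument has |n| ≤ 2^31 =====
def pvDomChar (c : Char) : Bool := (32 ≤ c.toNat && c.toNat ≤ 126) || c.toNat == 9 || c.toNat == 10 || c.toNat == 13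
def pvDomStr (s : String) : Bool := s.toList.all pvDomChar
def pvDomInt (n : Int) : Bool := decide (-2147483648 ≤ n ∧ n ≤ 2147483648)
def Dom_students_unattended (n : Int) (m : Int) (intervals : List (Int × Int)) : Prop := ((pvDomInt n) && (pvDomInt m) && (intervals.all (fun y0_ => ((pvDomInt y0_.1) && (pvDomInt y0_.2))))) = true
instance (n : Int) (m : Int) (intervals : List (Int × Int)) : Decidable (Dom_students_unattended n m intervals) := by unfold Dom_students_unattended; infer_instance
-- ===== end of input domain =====

-- B replaces A's sorted-event sweep (running counter over 2m tagged events) by an elementary-gap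
-- decomposition with a direct per-gap stabbing count over the intervals (alternative algorithm,
-- same return value on all inputs; not claimed faster).

-- ===== PORT A =====
-- loop body of A's 'for i in range(len(teachers))' (pyGetD is exact here: i and i-1 are always
-- in Python's accepted index range, i-1 = -1 wrapping to the last element as in Python)
def pvABody (teachers : List (Int × Int)) (st : Int × Int) (i : Int) : Int × Int :=
  let curr := st.1
  let total := st.2
  let total := if curr > 0 then
      total + ((PySem.List.pyGetD teachers i ((0:Int),(0:Int))).1
             - (PySem.List.pyGetD teachers (i - 1) ((0:Int),(0:Int))).1)
    else total
  let curr := if (PySem.List.pyGetD teachers i ((0:Int),(0:Int))).2 = -1 then curr + 1 else curr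
  let curr := if (PySem.List.pyGetD teachers i ((0:Int),(0:Int))).2 = 1 then curr - 1 else curr
  (curr, total)

def students_unattended (n : Int) (m : Int) (intervals : List (Int × Int)) : Int :=
  let teachers : List (Int × Int) :=
    intervals.foldl (fun acc p => acc ++ [(p.1, -1)] ++ [(p.2 + 1, 1)]) []
  let teachers := PySem.List.sorted2 teachers Prod.fst Prod.snd   -- teachers.sort(): tuple (lex) order
  let res := (PySem.List.pyRange 0 (PySem.List.len teachers) 1).foldl (pvABody teachers) ((0:Int), (0:Int))
  n - res.2

-- ===== PORT B =====
def students_unattended_alt (n : Int) (m : Int) (intervals : List (Int × Int)) : Int :=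
  -- coords = sorted({b for b, _ in intervals} | {e + 1 for _, e in intervals})
  let coords := PySem.List.sorted
    (PySem.Set.ofList (intervals.map (fun p => p.1) ++ intervals.map (fun p => p.2 + 1)))
    (fun x => x)
  -- for x, y in zip(coords, coords[1:]): depth = sum((b <= x) - (e+1 <= x)); if depth > 0: covered += y - x
  let covered := (coords.zip (PySem.List.slice coords (some 1) none)).foldl
    (fun (covered : Int) q =>
      let depth := (intervals.map (fun p =>
        (if p.1 ≤ q.1 then (1:Int) else 0) - (if p.2 + 1 ≤ q.1 then (1:Int) else 0))).sum
      if depth > 0 then covered + (q.2 - q.1) else covered) 0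
  n - covered

-- ===== PRECONDITION & SPEC =====
def Spec_students_unattended (n : Int) (m : Int) (intervals : List (Int × Int)) (out : Int) : Prop := out = students_unattended_alt n m intervals
instance (n : Int) (m : Int) (intervals : List (Int × Int)) (out : Int) : Decidable (Spec_students_unattended n m intervals out) := by unfold Spec_students_unattended; infer_instance

-- ===== CLAIM (what is proved, stated in full; the proofs are below) =====
def Claim_equal_students_unattended : Prop := ∀ (n : Int) (m : Int) (intervals : List (Int × Int)), Dom_students_unattended n m intervals → Spec_students_unattended n m intervals (students_unattended n m intervals)

-- ===== LEMMAS AND PROOFS =====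

-- event list A builds: one (b, -1) and one (e+1, +1) per interval
def pvEv (l : List (Int × Int)) : List (Int × Int) := l.flatMap (fun p => [(p.1, -1), (p.2 + 1, 1)])

-- depth change an event tag contributes (A increments on -1, decrements on +1)
def pvDt (t : Int) : Int := (if t = -1 then 1 else 0) + (if t = 1 then -1 else 0)

-- structural form of A's sweep: state (total, curr, prev-coordinate)
def pvAstep (st : Int × Int × Int) (q : Int × Int) : Int × Int × Int :=
  (st.1 + (if st.2.1 > 0 then q.1 - st.2.2 else 0), st.2.1 + pvDt q.2, q.1)

-- grouped sweep over (coordinate, delta) pairs: same state shape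
def pvGstep (st : Int × Int × Int) (q : Int × Int) : Int × Int × Int :=
  (st.1 + (if st.2.1 > 0 then q.1 - st.2.2 else 0), st.2.1 + q.2, q.1)

-- merge adjacent events with equal coordinates, summing their depth changes
def pvGroup : List (Int × Int) → List (Int × Int)
  | [] => []
  | (x, t) :: rest =>
    match pvGroup rest with
    | [] => [(x, pvDt t)]
    | (y, d) :: gs => if x = y then (x, d + pvDt t) :: gs else (x, pvDt t) :: (y, d) :: gs

-- total depth change of an event list at a coordinate
def pvDsum (ts : List (Int × Int)) (u : Int) : Int :=
  (ts.map (fun q => if q.1 = u then pvDt q.2 else 0)).sum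

-- signed number of events at coordinates ≤ x ("depth" of the gap starting at x)
def pvDepth (ts : List (Int × Int)) (x : Int) : Int :=
  (ts.map (fun q => if q.1 ≤ x then pvDt q.2 else 0)).sum

-- B's covered total in recursive form: sum of gaps (x, next) whose depth D x is positive
def pvZipSum (D : Int → Int) : List Int → Int
  | [] => 0
  | [_] => 0
  | x :: y :: r => (if D x > 0 then y - x else 0) + pvZipSum D (y :: r)

-- the grouped sweep's covered total, with c = depth entering the list
def pvZipSumD : Int → List (Int × Int) → Int
  | _, [] => 0
  | _, [_] => 0
  | c, (x, d) :: (y, e) :: r => (if c + d > 0 then y - x else 0) + pvZipSumD (c + d) ((y, e) :: r)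

-- "running prefix sums of the deltas agree with D at every coordinate of the list"
def pvPrefOK (D : Int → Int) : Int → List (Int × Int) → Prop
  | _, [] => True
  | c, (x, d) :: r => D x = c + d ∧ pvPrefOK D (c + d) r

-- lexicographic ≤ on pairs (the order sorted2 produces)
def pvR (a b : Int × Int) : Prop := a.1 < b.1 ∨ (a.1 = b.1 ∧ a.2 ≤ b.2)

theorem pvR_trans {a b c : Int × Int} (h1 : pvR a b) (h2 : pvR b c) : pvR a c := by
  unfold pvR at *; omega

-- grouped sweep equals the raw event sweep (zero-length gaps vanish)
theorem pvWalk_group : ∀ (ts : List (Int × Int)) (st : Int × Int × Int),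
    ts.foldl pvAstep st = (pvGroup ts).foldl pvGstep st := by
  intro ts
  induction ts with
  | nil => intro st; rfl
  | cons q rest ih =>
    intro st
    obtain ⟨x, t⟩ := q
    rw [List.foldl_cons, ih]
    rcases hg : pvGroup rest with _ | ⟨⟨y, d⟩, gs⟩
    · simp only [pvGroup, hg]
      simp [pvAstep, pvGstep]
    · simp only [pvGroup, hg]
      by_cases hxy : x = y
      · subst hxy
        rw [if_pos rfl]
        simp only [List.foldl_cons]
        congr 1
        simp only [pvAstep, pvGstep]
        refine Prod.ext ?_ (Prod.ext ?_ rfl)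
        · simp
        · simp only []
          omega
      · rw [if_neg hxy]
        simp only [List.foldl_cons]
        rfl

theorem pv_insertBy_pairwise (f : Int × Int → Int × Int → Bool)
    (hT : ∀ a b, f a b = true → pvR a b) (hF : ∀ a b, f a b = false → pvR b a)
    (x : Int × Int) : ∀ (l : List (Int × Int)), l.Pairwise pvR →
    (PySem.List.insertBy f x l).Pairwise pvR := by
  intro l
  induction l with
  | nil => intro _; simp [PySem.List.insertBy]
  | cons y ys ih =>
    intro hl
    rcases List.pairwise_cons.mp hl with ⟨hy, hys⟩
    have hstep : PySem.List.insertBy f x (y :: ys)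
        = if f x y then x :: y :: ys else y :: PySem.List.insertBy f x ys := rfl
    rw [hstep]
    by_cases hf : f x y = true
    · rw [if_pos hf]
      refine List.pairwise_cons.mpr ⟨?_, hl⟩
      intro z hz
      rcases List.mem_cons.mp hz with rfl | hz'
      · exact hT _ _ hf
      · exact pvR_trans (hT _ _ hf) (hy z hz')
    · rw [if_neg hf]
      refine List.pairwise_cons.mpr ⟨?_, ih hys⟩
      intro z hz
      rcases (PySem.List.mem_insertBy f x z ys).mp hz with rfl | hz'
      · exact hF _ _ (by simpa using hf)
      · exact hy z hz'

theorem pv_foldl_insertBy_pairwise (f : Int × Int → Int × Int → Bool)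
    (hT : ∀ a b, f a b = true → pvR a b) (hF : ∀ a b, f a b = false → pvR b a) :
    ∀ (xs acc : List (Int × Int)), acc.Pairwise pvR →
    (List.foldl (fun acc x => PySem.List.insertBy f x acc) acc xs).Pairwise pvR := by
  intro xs
  induction xs with
  | nil => intro acc h; exact h
  | cons q qs ih =>
    intro acc h
    simp only [List.foldl_cons]
    exact ih _ (pv_insertBy_pairwise f hT hF q acc h)

theorem pv_sorted2_pairwise (xs : List (Int × Int)) :
    (PySem.List.sorted2 xs Prod.fst Prod.snd).Pairwise pvR := by
  have h : PySem.List.sorted2 xs Prod.fst Prod.snd =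
      List.foldl (fun acc x => PySem.List.insertBy
        (fun a b => decide (a.1 < b.1) || (!decide (b.1 < a.1) && decide (a.2 < b.2))) x acc) [] xs := rfl
  rw [h]
  refine pv_foldl_insertBy_pairwise _ ?_ ?_ xs [] List.Pairwise.nil
  · intro a b hab
    simp only [Bool.or_eq_true, Bool.and_eq_true, Bool.not_eq_eq_eq_not, Bool.not_true,
      decide_eq_true_eq, decide_eq_false_iff_not] at hab
    unfold pvR; omega
  · intro a b hab
    simp only [Bool.or_eq_false_iff, Bool.and_eq_false_iff, Bool.not_eq_eq_eq_not, Bool.not_false,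
      decide_eq_true_eq, decide_eq_false_iff_not] at hab
    unfold pvR; omega

theorem pvGroup_cons_head (x : Int) (t : Int) (rest : List (Int × Int)) :
    ∃ d gs, pvGroup ((x, t) :: rest) = (x, d) :: gs := by
  rcases hg : pvGroup rest with _ | ⟨⟨y, d⟩, gs⟩
  · exact ⟨pvDt t, [], by simp only [pvGroup, hg]⟩
  · by_cases h : x = y
    · exact ⟨d + pvDt t, gs, by simp only [pvGroup, hg]; rw [if_pos h]⟩
    · exact ⟨pvDt t, (y, d) :: gs, by simp only [pvGroup, hg]; rw [if_neg h]⟩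

theorem pvGroup_eq_nil : ∀ {ts : List (Int × Int)}, pvGroup ts = [] → ts = [] := by
  intro ts h
  cases ts with
  | nil => rfl
  | cons q rest =>
    obtain ⟨x, t⟩ := q
    obtain ⟨d, gs, hg⟩ := pvGroup_cons_head x t rest
    rw [hg] at h
    cases h

theorem pvGroup_fst_complete : ∀ (ts : List (Int × Int)) (u : Int),
    u ∈ ts.map Prod.fst → u ∈ (pvGroup ts).map Prod.fst := by
  intro ts
  induction ts with
  | nil => simp [pvGroup]
  | cons q rest ih =>
    obtain ⟨x, t⟩ := q
    intro u hu
    simp only [List.map_cons, List.mem_cons] at hu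
    rcases hg : pvGroup rest with _ | ⟨⟨y, d⟩, gs⟩
    · simp only [pvGroup, hg]
      rcases hu with rfl | hu'
      · simp
      · have := ih u hu'
        rw [hg] at this
        simp at this
    · simp only [pvGroup, hg]
      have htail : u = x ∨ u ∈ ((y, d) :: gs).map Prod.fst := by
        rcases hu with rfl | hu'
        · exact Or.inl rfl
        · have := ih u hu'
          rw [hg] at this
          exact Or.inr this
      by_cases hxy : x = y
      · rw [if_pos hxy]
        rcases htail with rfl | hm
        · simp
        · simp only [List.map_cons, List.mem_cons] at hm ⊢
          rcases hm with rfl | hm'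
          · exact Or.inl hxy.symm
          · exact Or.inr hm'
      · rw [if_neg hxy]
        rcases htail with rfl | hm
        · simp
        · simp only [List.map_cons, List.mem_cons] at hm ⊢
          tauto

theorem pvGroup_pairwise : ∀ (ts : List (Int × Int)),
    ts.Pairwise (fun a b => a.1 ≤ b.1) →
    (pvGroup ts).Pairwise (fun a b => a.1 < b.1) := by
  intro ts
  induction ts with
  | nil => intro _; simp [pvGroup]
  | cons q rest ih =>
    obtain ⟨x, t⟩ := q
    intro hp
    rcases List.pairwise_cons.mp hp with ⟨hx, hrest⟩
    have ihp := ih hrest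
    rcases hg : pvGroup rest with _ | ⟨⟨y, d⟩, gs⟩
    · simp only [pvGroup, hg]
      simp
    · simp only [pvGroup, hg]
      rw [hg] at ihp
      rcases List.pairwise_cons.mp ihp with ⟨hy, hgs⟩
      by_cases hxy : x = y
      · subst hxy
        rw [if_pos rfl]
        exact List.pairwise_cons.mpr ⟨hy, hgs⟩
      · rw [if_neg hxy]
        -- y is the head key of rest, so x ≤ y and x ≠ y
        have hxley : x ≤ y := by
          cases rest with
          | nil => rw [show pvGroup ([] : List (Int × Int)) = [] from rfl] at hg; cases hg
          | cons r rest' =>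
            obtain ⟨a, s⟩ := r
            obtain ⟨d', gs', hgh⟩ := pvGroup_cons_head a s rest'
            rw [hgh] at hg
            have hay : a = y := congrArg Prod.fst (by exact congrArg (fun l => List.headD l (0,0)) hg)
            have := hx (a, s) (List.mem_cons_self)
            simpa [hay] using this
        refine List.pairwise_cons.mpr ⟨?_, List.pairwise_cons.mpr ⟨hy, hgs⟩⟩
        intro z hz
        rcases List.mem_cons.mp hz with rfl | hz'
        · simp only []; omega
        · have := hy z hz'
          simp only [] at this ⊢
          omega

theorem pvDsum_nil (u : Int) : pvDsum [] u = 0 := rfl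

theorem pvDsum_cons (x t : Int) (ts : List (Int × Int)) (u : Int) :
    pvDsum ((x, t) :: ts) u = (if x = u then pvDt t else 0) + pvDsum ts u := by
  simp [pvDsum]

theorem pvDsum_eq_zero : ∀ (ts : List (Int × Int)) (u : Int),
    u ∉ ts.map Prod.fst → pvDsum ts u = 0 := by
  intro ts
  induction ts with
  | nil => intro u _; rfl
  | cons q rest ih =>
    obtain ⟨x, t⟩ := q
    intro u hu
    simp only [List.map_cons, List.mem_cons] at hu
    rw [not_or] at hu
    rw [pvDsum_cons, if_neg (by omega), ih u hu.2]
    norm_num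

-- every grouped entry carries its coordinate's total depth change
theorem pvGroup_forward : ∀ (ts : List (Int × Int)),
    ts.Pairwise (fun a b => a.1 ≤ b.1) →
    ∀ p ∈ pvGroup ts, p.1 ∈ ts.map Prod.fst ∧ p.2 = pvDsum ts p.1 := by
  intro ts
  induction ts with
  | nil => intro _ p hp; simp [pvGroup] at hp
  | cons q rest ih =>
    obtain ⟨x, t⟩ := q
    intro hp p hmem
    rcases List.pairwise_cons.mp hp with ⟨hx, hrest⟩
    have ihf := ih hrest
    have hgp := pvGroup_pairwise rest hrest
    rcases hg : pvGroup rest with _ | ⟨⟨y, d⟩, gs⟩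
    · simp only [pvGroup, hg] at hmem
      have hrnil : rest = [] := pvGroup_eq_nil hg
      subst hrnil
      simp only [List.mem_singleton] at hmem
      subst hmem
      simp [pvDsum_cons, pvDsum_nil]
    · simp only [pvGroup, hg] at hmem
      rw [hg] at ihf hgp
      rcases List.pairwise_cons.mp hgp with ⟨hylt, _⟩
      by_cases hxy : x = y
      · subst hxy
        rw [if_pos rfl] at hmem
        rcases List.mem_cons.mp hmem with rfl | hmem'
        · have hd := ihf (x, d) (List.mem_cons_self)
          refine ⟨by simp, ?_⟩
          simp only []
          rw [pvDsum_cons, if_pos rfl]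
          have := hd.2
          simp only [] at this
          omega
        · have hIH := ihf p (List.mem_cons_of_mem _ hmem')
          have hne : x < p.1 := hylt p hmem'
          refine ⟨by simp [hIH.1], ?_⟩
          rw [pvDsum_cons, if_neg (by omega), hIH.2]
          omega
      · rw [if_neg hxy] at hmem
        -- x is strictly below every key of rest
        have hxnot : x ∉ rest.map Prod.fst := by
          intro hmm
          cases rest with
          | nil => simp at hmm
          | cons r rest' =>
            obtain ⟨a, s⟩ := r
            obtain ⟨d', gs', hgh⟩ := pvGroup_cons_head a s rest'
            rw [hgh] at hg
            have hay : a = y := congrArg Prod.fst (by exact congrArg (fun l => List.headD l (0,0)) hg)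
            have hrp := List.pairwise_cons.mp hrest
            simp only [List.map_cons, List.mem_cons] at hmm
            rcases hmm with rfl | hmm'
            · exact hxy hay
            · rcases List.mem_map.mp hmm' with ⟨q', hq', hq1⟩
              have h1 := hx q' (List.mem_cons_of_mem _ hq')
              have h2 := hrp.1 q' hq'
              have h3 := hx (a, s) (List.mem_cons_self)
              simp only [] at h1 h2 h3
              rw [hq1] at h2
              have : x = a := by omega
              exact hxy (this.trans hay)
        rcases List.mem_cons.mp hmem with rfl | hmem'
        · refine ⟨by simp, ?_⟩
          simp only []
          rw [pvDsum_cons, if_pos rfl, pvDsum_eq_zero rest x hxnot]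
          omega
        · have hIH := ihf p hmem'
          have hne : p.1 ≠ x := by
            intro hh
            rw [hh] at hIH
            exact hxnot hIH.1
          refine ⟨by simp [hIH.1], ?_⟩
          rw [pvDsum_cons, if_neg (fun hh => hne hh.symm), hIH.2]
          omega

-- ---- A's indexed loop is the structural sweep ----

theorem pvIdxWalk (ts : List (Int × Int)) :
    ∀ (nn k : Nat) (c tot : Int), ts.length - k = nn → 1 ≤ k → k ≤ ts.length →
    (PySem.List.pyRange (k : Int) (PySem.List.len ts) 1).foldl (pvABody ts) (c, tot)
      = ((((ts.drop k).foldl pvAstep (tot, c, (ts.getD (k - 1) (0, 0)).1)).2.1),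
         (((ts.drop k).foldl pvAstep (tot, c, (ts.getD (k - 1) (0, 0)).1)).1)) := by
  intro nn
  induction nn with
  | zero =>
    intro k c tot h h1 h2
    have hk : k = ts.length := by omega
    subst hk
    rw [PySem.List.pyRange_one_eq_nil (by rw [PySem.List.len_eq])]
    rw [List.drop_length]
    rfl
  | succ nn ih =>
    intro k c tot h h1 h2
    have hklt : k < ts.length := by omega
    rw [PySem.List.pyRange_one_cons (by rw [PySem.List.len_eq]; exact_mod_cast hklt)]
    rw [List.foldl_cons]
    have hget : PySem.List.pyGetD ts (k : Int) ((0:Int), (0:Int)) = ts[k] := by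
      rw [PySem.List.pyGetD_natCast]
      exact List.getD_eq_getElem _ _ hklt
    have hcast : (k : Int) - 1 = ((k - 1 : Nat) : Int) := by omega
    have hget1 : PySem.List.pyGetD ts ((k : Int) - 1) ((0:Int), (0:Int)) = ts[k - 1]'(by omega) := by
      rw [hcast, PySem.List.pyGetD_natCast]
      exact List.getD_eq_getElem _ _ (by omega)
    have hbody : pvABody ts (c, tot) (k : Int)
        = ((if ts[k].2 = 1 then (if ts[k].2 = -1 then c + 1 else c) - 1
             else (if ts[k].2 = -1 then c + 1 else c)),
           (if c > 0 then tot + (ts[k].1 - (ts[k-1]'(by omega)).1) else tot)) := by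
      simp only [pvABody, hget, hget1]
    rw [hbody]
    have hcast2 : (k : Int) + 1 = ((k + 1 : Nat) : Int) := by omega
    rw [hcast2]
    rw [ih (k + 1) _ _ (by omega) (by omega) (by omega)]
    have hdrop : ts.drop k = ts[k] :: ts.drop (k + 1) := (List.getElem_cons_drop hklt).symm
    have hprev : (ts.getD ((k + 1) - 1) (0, 0)).1 = ts[k].1 := by
      rw [show k + 1 - 1 = k from rfl, List.getD_eq_getElem _ _ hklt]
    have hinit : pvAstep (tot, c, (ts.getD (k - 1) (0, 0)).1) ts[k]
        = ((if c > 0 then tot + (ts[k].1 - (ts[k-1]'(by omega)).1) else tot),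
           (if ts[k].2 = 1 then (if ts[k].2 = -1 then c + 1 else c) - 1
             else (if ts[k].2 = -1 then c + 1 else c)),
           (ts.getD ((k + 1) - 1) (0, 0)).1) := by
      rw [hprev]
      have hgd : (ts.getD (k - 1) (0, 0)).1 = (ts[k-1]'(by omega)).1 := by
        rw [List.getD_eq_getElem _ _ (by omega : k - 1 < ts.length)]
      simp only [pvAstep, pvDt, hgd]
      refine Prod.ext ?_ (Prod.ext ?_ rfl)
      · simp only []
        split_ifs <;> omega
      · simp only []
        split_ifs <;> omega
    conv_rhs => rw [hdrop, List.foldl_cons, hinit]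

-- A's result in structural-sweep form
theorem pvA_shape (n m : Int) (l : List (Int × Int)) :
    students_unattended n m l
      = n - ((PySem.List.sorted2 (pvEv l) Prod.fst Prod.snd).foldl pvAstep (0, 0, 0)).1 := by
  have hflat : l.foldl (fun acc p => acc ++ [(p.1, -1)] ++ [(p.2 + 1, 1)]) ([] : List (Int × Int))
      = pvEv l := by
    have hb : (fun (acc : List (Int × Int)) (p : Int × Int) => acc ++ [(p.1, -1)] ++ [(p.2 + 1, 1)])
        = (fun acc p => acc ++ ((fun p : Int × Int => [(p.1, -1), (p.2 + 1, 1)]) p)) := by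
      funext acc p
      simp
    rw [hb, PySem.List.foldl_append_eq_flatMap]
    simp [pvEv]
  simp only [students_unattended]
  rw [hflat]
  rcases hts : PySem.List.sorted2 (pvEv l) Prod.fst Prod.snd with _ | ⟨⟨x0, t0⟩, rest⟩
  · rw [PySem.List.len_eq]
    norm_num
  · have hlen : 0 < ((x0, t0) :: rest).length := by simp
    rw [PySem.List.pyRange_one_cons (by rw [PySem.List.len_eq]; exact_mod_cast hlen)]
    rw [List.foldl_cons]
    have hbody0 : pvABody ((x0, t0) :: rest) ((0:Int), (0:Int)) 0
        = ((if t0 = 1 then (if t0 = -1 then (0:Int) + 1 else 0) - 1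
             else (if t0 = -1 then (0:Int) + 1 else 0)), (0:Int)) := by
      simp only [pvABody, PySem.List.pyGetD_zero_cons]
      norm_num
    rw [hbody0, show (0:Int) + 1 = ((1 : Nat) : Int) by norm_num]
    rw [pvIdxWalk ((x0, t0) :: rest) rest.length 1 _ _ (by simp) (by omega) (by simp)]
    have hstep0 : pvAstep ((0:Int), (0:Int), (0:Int)) (x0, t0)
        = ((0:Int), (if t0 = 1 then (if t0 = -1 then (0:Int) + 1 else 0) - 1
             else (if t0 = -1 then (0:Int) + 1 else 0)),
           ((((x0, t0) :: rest).getD (1 - 1) (0, 0)).1)) := by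
      simp only [pvAstep, pvDt]
      refine Prod.ext ?_ (Prod.ext ?_ ?_)
      · norm_num
      · simp only []
        split_ifs <;> omega
      · rfl
    rw [List.foldl_cons, hstep0]
    rfl

-- ---- B-side: depth function, gap sums ----

theorem pvDepth_cons (x t : Int) (ts : List (Int × Int)) (u : Int) :
    pvDepth ((x, t) :: ts) u = (if x ≤ u then pvDt t else 0) + pvDepth ts u := by
  simp [pvDepth]

theorem pvDepth_eq_zero (ts : List (Int × Int)) (u : Int)
    (h : ∀ q ∈ ts, ¬ q.1 ≤ u) : pvDepth ts u = 0 := by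
  unfold pvDepth
  apply List.sum_eq_zero
  intro v hv
  rcases List.mem_map.mp hv with ⟨q, hq, rfl⟩
  rw [if_neg (h q hq)]

theorem pvDepth_perm {ts ts' : List (Int × Int)} (h : ts.Perm ts') (u : Int) :
    pvDepth ts u = pvDepth ts' u := by
  unfold pvDepth
  exact (h.map _).sum_eq

-- B's per-gap stabbing count over the intervals IS the event depth
theorem pvDepth_ev (l : List (Int × Int)) (x : Int) :
    pvDepth (pvEv l) x
      = (l.map (fun p => (if p.1 ≤ x then (1:Int) else 0) - (if p.2 + 1 ≤ x then (1:Int) else 0))).sum := by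
  induction l with
  | nil => rfl
  | cons p l ih =>
    obtain ⟨b, e⟩ := p
    have h : pvEv ((b, e) :: l) = (b, -1) :: (e + 1, 1) :: pvEv l := by simp [pvEv]
    rw [h, pvDepth_cons, pvDepth_cons, ih]
    simp only [List.map_cons, List.sum_cons, pvDt]
    split_ifs <;> (first | contradiction | ring)

-- the grouped sweep's covered total in pvZipSumD form
theorem pvFoldG : ∀ (G : List (Int × Int)) (cov c p : Int),
    (G.foldl pvGstep (cov, c, p)).1
      = cov + (if c > 0 then (G.headD (p, 0)).1 - p else 0) + pvZipSumD c G := by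
  intro G
  induction G with
  | nil =>
    intro cov c p
    simp only [List.foldl_nil, List.headD_nil, pvZipSumD]
    split_ifs <;> ring
  | cons q G' ih =>
    intro cov c p
    obtain ⟨x, d⟩ := q
    rw [List.foldl_cons]
    have hstep : pvGstep (cov, c, p) (x, d) = (cov + (if c > 0 then x - p else 0), c + d, x) := rfl
    rw [hstep, ih]
    cases G' with
    | nil =>
      simp only [List.headD_nil, List.headD_cons, pvZipSumD]
      split_ifs <;> ring
    | cons q' r =>
      obtain ⟨y, e⟩ := q'
      simp only [List.headD_cons, pvZipSumD]
      split_ifs <;> ring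

-- with correct prefix depths, the grouped covered total is B's gap sum
theorem pvZipSumD_eq (D : Int → Int) : ∀ (G : List (Int × Int)) (c : Int),
    pvPrefOK D c G → pvZipSumD c G = pvZipSum D (G.map Prod.fst) := by
  intro G
  induction G with
  | nil => intro c _; rfl
  | cons q G' ih =>
    intro c h
    obtain ⟨x, d⟩ := q
    cases G' with
    | nil => rfl
    | cons q' r =>
      obtain ⟨y, e⟩ := q'
      obtain ⟨h1, h2⟩ := h
      simp only [pvZipSumD, List.map_cons, pvZipSum]
      rw [ih (c + d) h2, h1]
      simp

theorem pvPrefOK_shift (D D' : Int → Int) (k : Int) : ∀ (L : List (Int × Int)) (c : Int),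
    (∀ p ∈ L, D' p.1 = k + D p.1) → pvPrefOK D c L → pvPrefOK D' (c + k) L := by
  intro L
  induction L with
  | nil => intro c _ _; trivial
  | cons q L' ih =>
    intro c hmem h
    obtain ⟨x, d⟩ := q
    obtain ⟨h1, h2⟩ := h
    refine ⟨?_, ?_⟩
    · have := hmem (x, d) List.mem_cons_self
      simp only [] at this
      omega
    · have htail := ih (c + d) (fun p hp => hmem p (List.mem_cons_of_mem _ hp)) h2
      have harith : c + d + k = c + k + d := by ring
      rw [harith] at htail
      exact htail

-- the grouped list's prefix delta sums are exactly the event depths at its coordinates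
theorem pvPref_group : ∀ (ts : List (Int × Int)),
    ts.Pairwise (fun a b => a.1 ≤ b.1) → pvPrefOK (pvDepth ts) 0 (pvGroup ts) := by
  intro ts
  induction ts with
  | nil => intro _; trivial
  | cons q rest ih =>
    obtain ⟨x, t⟩ := q
    intro hp
    rcases List.pairwise_cons.mp hp with ⟨hx, hrest⟩
    have ihp := ih hrest
    rcases hg : pvGroup rest with _ | ⟨⟨y, d⟩, gs⟩
    · have hrnil : rest = [] := pvGroup_eq_nil hg
      subst hrnil
      simp only [pvGroup]
      refine ⟨?_, trivial⟩
      rw [pvDepth_cons, if_pos le_rfl]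
      simp [pvDepth]
    · simp only [pvGroup, hg]
      rw [hg] at ihp
      obtain ⟨hihd, hihtail⟩ := ihp
      have hymem : y ∈ rest.map Prod.fst := by
        have := pvGroup_forward rest hrest (y, d) (by rw [hg]; exact List.mem_cons_self)
        exact this.1
      have hxy_le : x ≤ y := by
        rcases List.mem_map.mp hymem with ⟨q', hq', hq1⟩
        have := hx q' hq'
        omega
      have hgs_gt : ∀ p ∈ gs, y < p.1 := by
        have hgp := pvGroup_pairwise rest hrest
        rw [hg] at hgp
        exact (List.pairwise_cons.mp hgp).1
      -- depth in the full list: shift by pvDt t wherever x ≤ u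
      have hshift : ∀ u : Int, x ≤ u → pvDepth ((x, t) :: rest) u = pvDt t + pvDepth rest u := by
        intro u hu
        rw [pvDepth_cons, if_pos hu]
      by_cases hxy : x = y
      · subst hxy
        rw [if_pos rfl]
        refine ⟨?_, ?_⟩
        · rw [hshift x le_rfl]
          omega
        · have hmem : ∀ p ∈ gs, pvDepth ((x, t) :: rest) p.1 = pvDt t + pvDepth rest p.1 := by
            intro p hp
            exact hshift p.1 (le_of_lt (hgs_gt p hp))
          have := pvPrefOK_shift (pvDepth rest) (pvDepth ((x, t) :: rest)) (pvDt t) gs (0 + d) hmem hihtail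
          have harith : 0 + d + pvDt t = 0 + (d + pvDt t) := by ring
          rw [harith] at this
          exact this
      · rw [if_neg hxy]
        have hx_lt_y : x < y := lt_of_le_of_ne hxy_le hxy
        -- no event of rest sits at or below x
        have hnone : ∀ q' ∈ rest, ¬ q'.1 ≤ x := by
          intro q' hq' hle
          have hge := hx q' hq'
          have hqx : q'.1 = x := le_antisymm hle hge
          have hmm : x ∈ rest.map Prod.fst := by
            rw [← hqx]
            exact List.mem_map_of_mem hq'
          have hgm := pvGroup_fst_complete rest x hmm
          rw [hg] at hgm
          simp only [List.map_cons, List.mem_cons] at hgm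
          rcases hgm with h' | h'
          · omega
          · rcases List.mem_map.mp h' with ⟨p', hp', hp1⟩
            have := hgs_gt p' hp'
            omega
        refine ⟨?_, ?_, ?_⟩
        · rw [hshift x le_rfl, pvDepth_eq_zero rest x hnone]
          omega
        · rw [hshift y (le_of_lt hx_lt_y)]
          omega
        · have hmem : ∀ p ∈ gs, pvDepth ((x, t) :: rest) p.1 = pvDt t + pvDepth rest p.1 := by
            intro p hp
            exact hshift p.1 (le_of_lt (lt_trans hx_lt_y (hgs_gt p hp)))
          have := pvPrefOK_shift (pvDepth rest) (pvDepth ((x, t) :: rest)) (pvDt t) gs (0 + d) hmem hihtail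
          have harith : 0 + d + pvDt t = 0 + pvDt t + d := by ring
          rw [harith] at this
          exact this

-- B's loop over zipped consecutive coordinates, in pvZipSum form
theorem pvFoldB (l : List (Int × Int)) : ∀ (L : List Int) (cov : Int),
    (L.zip L.tail).foldl
      (fun (covered : Int) q =>
        if (l.map (fun p =>
          (if p.1 ≤ q.1 then (1:Int) else 0) - (if p.2 + 1 ≤ q.1 then (1:Int) else 0))).sum > 0
        then covered + (q.2 - q.1) else covered) cov
      = cov + pvZipSum (fun x => (l.map (fun p =>
          (if p.1 ≤ x then (1:Int) else 0) - (if p.2 + 1 ≤ x then (1:Int) else 0))).sum) L := by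
  intro L
  induction L with
  | nil => intro cov; simp [pvZipSum]
  | cons x L' ih =>
    intro cov
    cases L' with
    | nil => simp [pvZipSum]
    | cons y r =>
      simp only [List.tail_cons, List.zip_cons_cons, List.foldl_cons]
      simp only [List.tail_cons] at ih
      rw [ih]
      simp only [pvZipSum]
      split_ifs <;> ring

-- membership in the critical-coordinate pool equals membership among event coordinates
theorem pvEvCoords (l : List (Int × Int)) (u : Int) :
    u ∈ (pvEv l).map Prod.fst ↔ u ∈ l.map (fun p => p.1) ++ l.map (fun p => p.2 + 1) := by
  simp only [pvEv, List.map_flatMap, List.mem_flatMap, List.mem_append, List.mem_map,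
    List.map_cons, List.map_nil, List.mem_cons, List.not_mem_nil, or_false]
  constructor
  · rintro ⟨p, hp, hu⟩
    rcases hu with rfl | rfl
    · exact Or.inl ⟨p, hp, rfl⟩
    · exact Or.inr ⟨p, hp, rfl⟩
  · rintro (⟨p, hp, rfl⟩ | ⟨p, hp, rfl⟩)
    · exact ⟨p, hp, Or.inl rfl⟩
    · exact ⟨p, hp, Or.inr rfl⟩

-- B's sorted distinct coordinates are the grouped sweep's coordinates
theorem pvCoords (l : List (Int × Int)) :
    PySem.List.sorted
      (PySem.Set.ofList (l.map (fun p => p.1) ++ l.map (fun p => p.2 + 1))) (fun x => x)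
      = (pvGroup (PySem.List.sorted2 (pvEv l) Prod.fst Prod.snd)).map Prod.fst := by
  have hsorted : (PySem.List.sorted2 (pvEv l) Prod.fst Prod.snd).Pairwise (fun a b => a.1 ≤ b.1) :=
    (pv_sorted2_pairwise (pvEv l)).imp (by intro a b h; unfold pvR at h; omega)
  have hperm := PySem.List.sorted2_perm (pvEv l) Prod.fst Prod.snd false
  have hGfst : ((pvGroup (PySem.List.sorted2 (pvEv l) Prod.fst Prod.snd)).map Prod.fst).Pairwise (· < ·) :=
    List.pairwise_map.mpr (pvGroup_pairwise _ hsorted)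
  have hnodG : ((pvGroup (PySem.List.sorted2 (pvEv l) Prod.fst Prod.snd)).map Prod.fst).Nodup :=
    hGfst.imp (fun h => ne_of_lt h)
  have hmem : ∀ u, u ∈ (pvGroup (PySem.List.sorted2 (pvEv l) Prod.fst Prod.snd)).map Prod.fst
      ↔ u ∈ PySem.Set.ofList (l.map (fun p => p.1) ++ l.map (fun p => p.2 + 1)) := by
    intro u
    rw [PySem.Set.mem_ofList, ← pvEvCoords]
    constructor
    · intro hu
      rcases List.mem_map.mp hu with ⟨p, hp, rfl⟩
      have h1 := (pvGroup_forward _ hsorted p hp).1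
      exact ((hperm.map Prod.fst).mem_iff).mp h1
    · intro hu
      have h3 : u ∈ (PySem.List.sorted2 (pvEv l) Prod.fst Prod.snd).map Prod.fst :=
        ((hperm.map Prod.fst).mem_iff).mpr hu
      exact pvGroup_fst_complete _ u h3
  have hperm2 : ((pvGroup (PySem.List.sorted2 (pvEv l) Prod.fst Prod.snd)).map Prod.fst).Perm
      (PySem.Set.ofList (l.map (fun p => p.1) ++ l.map (fun p => p.2 + 1))) :=
    (List.perm_ext_iff_of_nodup hnodG (PySem.Set.nodup_ofList _)).mpr hmem
  exact PySem.List.sorted_eq_of_perm_of_pairwise_lt _ _ _ hperm2 hGfst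

-- B's result in gap-sum form
theorem pvB_shape (n m : Int) (l : List (Int × Int)) :
    students_unattended_alt n m l
      = n - pvZipSum (fun x => (l.map (fun p =>
          (if p.1 ≤ x then (1:Int) else 0) - (if p.2 + 1 ≤ x then (1:Int) else 0))).sum)
          (PySem.List.sorted
            (PySem.Set.ofList (l.map (fun p => p.1) ++ l.map (fun p => p.2 + 1))) (fun x => x)) := by
  simp only [students_unattended_alt]
  rw [PySem.List.slice_from_one, pvFoldB l _ 0, zero_add]

-- A = B (the whole equivalence, used by the verdict)
theorem pvMain (n m : Int) (l : List (Int × Int)) :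
    students_unattended n m l = students_unattended_alt n m l := by
  have hsorted : (PySem.List.sorted2 (pvEv l) Prod.fst Prod.snd).Pairwise (fun a b => a.1 ≤ b.1) :=
    (pv_sorted2_pairwise (pvEv l)).imp (by intro a b h; unfold pvR at h; omega)
  have hperm := PySem.List.sorted2_perm (pvEv l) Prod.fst Prod.snd false
  rw [pvA_shape, pvB_shape, pvWalk_group, pvFoldG, pvCoords]
  have hD : (fun x => (l.map (fun p =>
      (if p.1 ≤ x then (1:Int) else 0) - (if p.2 + 1 ≤ x then (1:Int) else 0))).sum)
      = pvDepth (PySem.List.sorted2 (pvEv l) Prod.fst Prod.snd) := by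
    funext u
    rw [← pvDepth_ev, pvDepth_perm hperm u]
  rw [hD, ← pvZipSumD_eq _ _ 0 (pvPref_group _ hsorted)]
  norm_num

-- ===== VERDICT (by name: the statement is the Claim_ definition above) =====
theorem students_unattended_spec : Claim_equal_students_unattended := by
  intro n m intervals _
  unfold Spec_students_unattended
  exact pvMain n m intervals
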